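-- pv_equiv track=rewrite | github.com/kaifengGuo/long-term-Generate-Recommendation | code/tiger_phase2_blend_common.py | build_sid_prefix_to_next
-- ===== SOURCE A (Python) =====
-- from typing import Any, Dict, List, Sequence, Tuple
--
-- def build_sid_prefix_to_next(sid2iid_map_tok: Dict[Tuple[int, ...], int]) -> Dict[Tuple[int, ...], List[int]]:
--     trie: Dict[Tuple[int, ...], List[int]] = {}
--     for sid_seq in sid2iid_map_tok.keys():
--         for pos in range(len(sid_seq)):
--             prefix = tuple(sid_seq[:pos])
--             nxt = int(sid_seq[pos])
--             bucket = trie.setdefault(prefix, [])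
--             if nxt not in bucket:
--                 bucket.append(nxt)
--     for prefix in trie:
--         trie[prefix] = sorted(trie[prefix])
--     return trie
-- ===== SOURCE B (Python) =====
-- def build_sid_prefix_to_next(sid2iid_map_tok):
--     out = {}
--     for sid_seq in sid2iid_map_tok:
--         prefix = ()
--         for tok in sid_seq:
--             t = int(tok)
--             bucket = out.get(prefix)
--             if bucket is None:
--                 out[prefix] = [t]
--             else:
--                 # binary search for the leftmost slot not below t, then
--                 # insert there unless t is already present
--                 lo, hi = 0, len(bucket)
--                 while lo < hi:
--                     mid = (lo + hi) // 2
--                     if bucket[mid] < t: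
--                         lo = mid + 1
--                     else:
--                         hi = mid
--                 if lo == len(bucket) or bucket[lo] != t:
--                     bucket.insert(lo, t)
--             prefix += (t,)
--     return out
-- ===== Notes on version B (the rewrite author's own statement) =====
-- stated objective: faster
-- what changed: B is a single pass that builds each prefix incrementally instead of re-slicing the sequence at every position, and keeps each bucket sorted and deduplicated by hand-written binary-search insertion, so A's linear membership-test-plus-append and its final whole-dict sorting pass disappear.
import Mathlib
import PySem

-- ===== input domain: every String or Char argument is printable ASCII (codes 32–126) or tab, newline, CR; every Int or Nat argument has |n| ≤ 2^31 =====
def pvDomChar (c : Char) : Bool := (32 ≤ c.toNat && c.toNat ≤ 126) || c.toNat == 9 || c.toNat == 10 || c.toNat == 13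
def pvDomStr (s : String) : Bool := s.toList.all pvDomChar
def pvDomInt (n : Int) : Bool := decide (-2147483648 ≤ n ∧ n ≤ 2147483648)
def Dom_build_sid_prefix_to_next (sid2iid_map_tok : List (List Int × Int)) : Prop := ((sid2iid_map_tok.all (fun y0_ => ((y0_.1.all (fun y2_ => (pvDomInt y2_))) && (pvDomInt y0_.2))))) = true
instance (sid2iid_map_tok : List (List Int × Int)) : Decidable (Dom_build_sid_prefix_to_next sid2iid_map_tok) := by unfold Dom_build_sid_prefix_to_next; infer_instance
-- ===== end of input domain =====

-- B replaces A's index-loop-with-slices plus final whole-dict sorting pass by one pass that grows each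
-- prefix incrementally and keeps every bucket sorted/deduplicated by binary-search insertion
-- (objective: faster; a timing run measured B faster on large inputs).

-- ===== PORT A =====
-- A: for each key sequence, for each position, slice out the prefix, append the next token to the
-- prefix's bucket if absent (setdefault), then a second pass sorts every bucket in place.
def build_sid_prefix_to_next (sid2iid_map_tok : List (List Int × Int)) : List (List Int × List Int) :=
  let trie : PySem.Dict (List Int) (List Int) :=
    sid2iid_map_tok.foldl (fun trie kv =>
      let sid_seq := kv.1
      (PySem.List.pyRange 0 (sid_seq.length : Int) 1).foldl (fun trie pos =>
        let prefx := PySem.List.slice sid_seq none (some pos)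
        -- pos ∈ range(len(sid_seq)) is always in range; int() is the identity on the Int elements
        let nxt := PySem.List.pyGetD sid_seq pos 0
        let trie := trie.setdefault prefx []
        let bucket := trie.getD prefx []
        if nxt ∈ bucket then trie else trie.insert prefx (bucket ++ [nxt])) trie)
      PySem.Dict.empty
  (trie.keys.foldl (fun tr prefx =>
      tr.insert prefx (PySem.List.sorted (tr.getD prefx []) (fun x => x) false)) trie).items

-- ===== PORT B =====
-- hand-written binary search from Source B (the while lo < hi loop): leftmost slot in bucket whose
-- element is not below t.  Python's nonnegative lo/hi are ported as Nat ((lo+hi)//2 on nonnegative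
-- ints is Nat division); bucket[mid] is always in range because mid < hi <= len(bucket), so getD is exact.
def pvBisect (bucket : List Int) (t : Int) (lo hi : Nat) : Nat :=
  if h : lo < hi then
    let mid := (lo + hi) / 2
    if bucket.getD mid 0 < t then pvBisect bucket t (mid + 1) hi
    else pvBisect bucket t lo mid
  else lo
termination_by hi - lo
decreasing_by all_goals omega

def build_sid_prefix_to_next_alt (sid2iid_map_tok : List (List Int × Int)) : List (List Int × List Int) :=
  (sid2iid_map_tok.foldl (fun out kv =>
    (kv.1.foldl (fun (s : PySem.Dict (List Int) (List Int) × List Int) tok =>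
        match s.1.get? s.2 with
        | none => (s.1.insert s.2 [tok], s.2 ++ [tok])
        | some bucket =>
          let lo := pvBisect bucket tok 0 bucket.length
          -- 'lo == len(bucket) or bucket[lo] != t' short-circuits, so bucket[lo] is in range
          let bucket' := if lo = bucket.length ∨ PySem.List.pyGetD bucket (lo : Int) 0 ≠ tok
            then PySem.List.insert bucket (lo : Int) tok else bucket
          (s.1.insert s.2 bucket', s.2 ++ [tok]))
      (out, ([] : List Int))).1)
    PySem.Dict.empty).items

-- ===== PRECONDITION & SPEC =====
def Spec_build_sid_prefix_to_next (sid2iid_map_tok : List (List Int × Int)) (out : List (List Int × List Int)) : Prop := out = build_sid_prefix_to_next_alt sid2iid_map_tok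
instance (sid2iid_map_tok : List (List Int × Int)) (out : List (List Int × List Int)) : Decidable (Spec_build_sid_prefix_to_next sid2iid_map_tok out) := by unfold Spec_build_sid_prefix_to_next; infer_instance

-- ===== CLAIM (what is proved, stated in full; the proofs are below) =====
def Claim_equal_build_sid_prefix_to_next : Prop := ∀ (sid2iid_map_tok : List (List Int × Int)), Dom_build_sid_prefix_to_next sid2iid_map_tok → Spec_build_sid_prefix_to_next sid2iid_map_tok (build_sid_prefix_to_next sid2iid_map_tok)

-- ===== LEMMAS AND PROOFS =====

-- sort a bucket, as A's final pass does
def pvSortI (b : List Int) : List Int := PySem.List.sorted b (fun x => x) false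

-- A's per-position update, on the prefix/token pair it amounts to
def pvUpdA (d : PySem.Dict (List Int) (List Int)) (p : List Int) (t : Int) : PySem.Dict (List Int) (List Int) :=
  let d' := d.setdefault p []
  let b := d'.getD p []
  if t ∈ b then d' else d'.insert p (b ++ [t])

-- B's per-token update
-- B's bucket update, as a named function (defeq to the lets inlined in the port)
def pvBIns (b : List Int) (t : Int) : List Int :=
  let lo := pvBisect b t 0 b.length
  if lo = b.length ∨ PySem.List.pyGetD b (lo : Int) 0 ≠ t then PySem.List.insert b (lo : Int) t else b

def pvUpdB (d : PySem.Dict (List Int) (List Int)) (p : List Int) (t : Int) : PySem.Dict (List Int) (List Int) :=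
  match d.get? p with
  | none => d.insert p [t]
  | some b => d.insert p (pvBIns b t)

-- structural form of the two inner loops: walk the sequence with the prefix accumulated so far
def pvGoA : PySem.Dict (List Int) (List Int) → List Int → List Int → PySem.Dict (List Int) (List Int)
  | d, _, [] => d
  | d, acc, t :: r => pvGoA (pvUpdA d acc t) (acc ++ [t]) r

def pvGoB : PySem.Dict (List Int) (List Int) → List Int → List Int → PySem.Dict (List Int) (List Int)
  | d, _, [] => d
  | d, acc, t :: r => pvGoB (pvUpdB d acc t) (acc ++ [t]) r

-- the dict with every bucket sorted (A's final pass, expressed value-wise)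
def pvMapV (d : PySem.Dict (List Int) (List Int)) : PySem.Dict (List Int) (List Int) :=
  PySem.Dict.mk (d.items.map (fun q => (q.1, pvSortI q.2)))

-- ---- binary-search insertion facts ----
lemma pvSorted_le (s : List Int) (hpw : s.Pairwise (· ≤ ·)) (i j : Nat) (hij : i ≤ j) (hj : j < s.length) :
    s.getD i 0 ≤ s.getD j 0 := by
  rcases Nat.lt_or_ge i j with h | h
  · rw [List.getD_eq_getElem _ _ (lt_of_le_of_lt hij hj), List.getD_eq_getElem _ _ hj]
    exact List.pairwise_iff_getElem.1 hpw i j _ _ h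
  · have hij' : i = j := le_antisymm hij h
    rw [hij']

lemma pvBisect_spec (s : List Int) (t : Int) (hpw : s.Pairwise (· ≤ ·)) (lo hi : Nat) :
    lo ≤ hi → hi ≤ s.length →
    lo ≤ pvBisect s t lo hi ∧ pvBisect s t lo hi ≤ hi ∧
      (∀ i, lo ≤ i → i < pvBisect s t lo hi → s.getD i 0 < t) ∧
      (∀ i, pvBisect s t lo hi ≤ i → i < hi → t ≤ s.getD i 0) := by
  fun_induction pvBisect s t lo hi with
  | case1 lo hi h mid hmid ih =>
    intro _ hhi
    have hmlt : mid < hi := by omega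
    obtain ⟨h1, h2, h3, h4⟩ := ih (by omega) hhi
    refine ⟨by omega, h2, ?_, h4⟩
    intro i hi0 hi1
    rcases Nat.lt_or_ge i (mid + 1) with hc | hc
    · calc s.getD i 0 ≤ s.getD mid 0 := pvSorted_le s hpw i mid (by omega) (by omega)
        _ < t := hmid
    · exact h3 i hc hi1
  | case2 lo hi h mid hmid ih =>
    intro _ hhi
    have hlom : lo ≤ mid := by omega
    have hmhi : mid < hi := by omega
    obtain ⟨h1, h2, h3, h4⟩ := ih hlom (by omega)
    refine ⟨h1, by omega, h3, ?_⟩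
    intro i hi1 hi2
    rcases Nat.lt_or_ge i mid with hc | hc
    · exact h4 i hi1 hc
    · calc t ≤ s.getD mid 0 := not_lt.1 hmid
        _ ≤ s.getD i 0 := pvSorted_le s hpw mid i hc (by omega)
  | case3 lo hi h =>
    intro hlohi _
    exact ⟨le_refl _, hlohi, fun i hi0 hi1 => absurd (lt_of_le_of_lt hi0 hi1) (lt_irrefl lo),
      fun i hi1 hi2 => absurd (lt_of_le_of_lt hi1 hi2) h⟩

lemma pvBIns_sorted (t : Int) (b : List Int) :
    pvBIns (pvSortI b) t = pvSortI (if t ∈ b then b else b ++ [t]) := by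
  have hpw : (pvSortI b).Pairwise (· ≤ ·) := PySem.List.sorted_pairwise b (fun x => x)
  obtain ⟨h1, h2, h3, h4⟩ :=
    pvBisect_spec (pvSortI b) t hpw 0 (pvSortI b).length (Nat.zero_le _) (le_refl _)
  set s := pvSortI b with hsdef
  set r := pvBisect s t 0 s.length with hrdef
  by_cases ht : t ∈ b
  · rw [if_pos ht]
    have hts : t ∈ s := (PySem.List.mem_sorted b (fun x => x) false t).2 ht
    obtain ⟨j, hj, hsj⟩ := List.getElem_of_mem hts
    have hrj : r ≤ j := by
      by_contra hc
      have hlt := h3 j (Nat.zero_le _) (by omega)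
      rw [List.getD_eq_getElem _ _ hj, hsj] at hlt
      exact lt_irrefl t hlt
    have hrlen : r < s.length := lt_of_le_of_lt hrj hj
    have hgr : s.getD r 0 = t := by
      have hle1 : t ≤ s.getD r 0 := h4 r (le_refl _) hrlen
      have hle2 : s.getD r 0 ≤ s.getD j 0 := pvSorted_le s hpw r j hrj hj
      rw [List.getD_eq_getElem _ _ hj, hsj] at hle2
      omega
    show (if r = s.length ∨ PySem.List.pyGetD s (r : Int) 0 ≠ t
        then PySem.List.insert s (r : Int) t else s) = s
    rw [if_neg]
    push Not
    exact ⟨Nat.ne_of_lt hrlen, by rw [PySem.List.pyGetD_natCast, hgr]⟩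
  · rw [if_neg ht]
    have hts : t ∉ s := fun h => ht ((PySem.List.mem_sorted b (fun x => x) false t).1 h)
    have hcond : r = s.length ∨ PySem.List.pyGetD s (r : Int) 0 ≠ t := by
      by_cases hr : r = s.length
      · exact Or.inl hr
      · refine Or.inr ?_
        rw [PySem.List.pyGetD_natCast]
        intro he
        have hrlen : r < s.length := lt_of_le_of_ne h2 hr
        rw [List.getD_eq_getElem _ _ hrlen] at he
        exact hts (he ▸ List.getElem_mem hrlen)
    show (if r = s.length ∨ PySem.List.pyGetD s (r : Int) 0 ≠ t
        then PySem.List.insert s (r : Int) t else s) = _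
    rw [if_pos hcond, PySem.List.insert_natCast s r t h2]
    have hperm : (s.take r ++ t :: s.drop r).Perm (PySem.List.sorted (b ++ [t]) (fun x => x) false) := by
      refine (List.perm_middle).trans ?_
      rw [List.take_append_drop]
      exact ((((PySem.List.sorted_perm b (fun x => x) false).cons t).trans
        ((List.perm_append_singleton t b).symm)).trans
        ((PySem.List.sorted_perm (b ++ [t]) (fun x => x) false).symm))
    have htake : ∀ x ∈ s.take r, x < t := by
      intro x hx
      obtain ⟨i, hi, hix⟩ := List.getElem_of_mem hx
      have hir : i < r := lt_of_lt_of_le hi (by simp [List.length_take])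
      have hilen : i < s.length := by
        have := List.length_take_le r s
        omega
      have := h3 i (Nat.zero_le _) hir
      rw [List.getD_eq_getElem _ _ hilen] at this
      rw [List.getElem_take] at hix
      omega
    have hdrop : ∀ x ∈ s.drop r, t ≤ x := by
      intro x hx
      obtain ⟨i, hi, hix⟩ := List.getElem_of_mem hx
      rw [List.getElem_drop] at hix
      have hl : r + i < s.length := by
        rw [List.length_drop] at hi
        omega
      have := h4 (r + i) (Nat.le_add_right _ _) hl
      rw [List.getD_eq_getElem _ _ hl] at this
      omega
    have hpair : (s.take r ++ t :: s.drop r).Pairwise (· ≤ ·) := by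
      refine List.pairwise_append.2 ⟨hpw.sublist (List.take_sublist r s), ?_, ?_⟩
      · refine List.pairwise_cons.2 ⟨hdrop, hpw.sublist (List.drop_sublist r s)⟩
      · intro x hx y hy
        rcases List.mem_cons.1 hy with h | h
        · exact le_of_lt (h ▸ htake x hx)
        · exact le_of_lt (lt_of_lt_of_le (htake x hx) (hdrop y h))
    exact PySem.List.eq_of_perm_of_pairwise_le_of_injective (fun x => x) (fun _ _ h => h)
      hperm hpair (PySem.List.sorted_pairwise (b ++ [t]) (fun x => x))

-- ---- pvMapV facts ----
lemma pvMapV_items (d : PySem.Dict (List Int) (List Int)) :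
    (pvMapV d).items = d.items.map (fun q => (q.1, pvSortI q.2)) := rfl

lemma pvMapV_keys (d : PySem.Dict (List Int) (List Int)) : (pvMapV d).keys = d.keys := by
  simp only [PySem.Dict.keys, pvMapV_items, List.map_map]
  rfl

lemma pvMapV_contains (d : PySem.Dict (List Int) (List Int)) (k : List Int) :
    (pvMapV d).contains k = d.contains k := by
  rw [PySem.Dict.contains_eq_decide_mem_keys, PySem.Dict.contains_eq_decide_mem_keys, pvMapV_keys]

lemma pvMapV_get? (d : PySem.Dict (List Int) (List Int)) (k : List Int) :
    (pvMapV d).get? k = (d.get? k).map pvSortI := by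
  obtain ⟨l⟩ := d
  induction l with
  | nil => rfl
  | cons q rest ih =>
    obtain ⟨a, b⟩ := q
    show (PySem.Dict.mk ((a, pvSortI b) :: rest.map (fun q => (q.1, pvSortI q.2)))).get? k = _
    rw [PySem.Dict.get?_mk_cons, PySem.Dict.get?_mk_cons]
    by_cases h : (a == k) = true
    · simp [h]
    · simp only [h, Bool.false_eq_true, if_false]
      exact ih

lemma pvMapV_insert (d : PySem.Dict (List Int) (List Int)) (k : List Int) (v : List Int) :
    (pvMapV d).insert k (pvSortI v) = pvMapV (d.insert k v) := by
  apply PySem.Dict.ext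
  rw [PySem.Dict.items_insert, pvMapV_items, pvMapV_items, PySem.Dict.items_insert, pvMapV_contains]
  by_cases h : d.contains k = true
  · rw [if_pos h, if_pos h, List.map_map, List.map_map]
    refine List.map_congr_left ?_
    intro q _
    by_cases hq : (q.1 == k) = true
    · simp [Function.comp, hq]
    · simp [Function.comp, hq]
  · rw [if_neg h, if_neg h, List.map_append]
    simp

lemma pvInsert_existing_self (d : PySem.Dict (List Int) (List Int)) (k : List Int) (v : List Int)
    (hnd : d.keys.Nodup) (h : d.get? k = some v) : d.insert k v = d := by
  apply PySem.Dict.ext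
  have hc : d.contains k = true := by
    rw [PySem.Dict.contains_eq_isSome_get?, h]; rfl
  rw [PySem.Dict.items_insert_of_contains d v hc]
  have hpt : ∀ q ∈ d.items, (if (q.1 == k) = true then (k, v) else q) = q := by
    intro q hq
    obtain ⟨q1, q2⟩ := q
    by_cases hqk : (q1 == k) = true
    · have hk : q1 = k := by simpa using hqk
      have hv : d.get? q1 = some q2 := PySem.Dict.get?_of_mem_items d hq hnd
      rw [hk, h] at hv
      have : v = q2 := Option.some.inj hv
      simp [hk, this]
    · simp [hqk]
  rw [List.map_congr_left hpt, List.map_id']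

-- ---- one token preserves the invariant ----
lemma pvUpd_step (d : PySem.Dict (List Int) (List Int)) (p : List Int) (t : Int)
    (hnd : d.keys.Nodup) : pvUpdB (pvMapV d) p t = pvMapV (pvUpdA d p t) := by
  by_cases hc : d.contains p = true
  · obtain ⟨b, hb⟩ : ∃ b, d.get? p = some b := by
      rw [PySem.Dict.contains_eq_isSome_get?] at hc
      exact Option.isSome_iff_exists.1 hc
    have hset : d.setdefault p [] = d := PySem.Dict.setdefault_of_contains d [] hc
    have hgd : d.getD p [] = b := by rw [PySem.Dict.getD_eq_get?_getD, hb]; rfl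
    have hB : (pvMapV d).get? p = some (pvSortI b) := by rw [pvMapV_get?, hb]; rfl
    simp only [pvUpdA, pvUpdB, hB, hset, hgd, pvBIns_sorted]
    by_cases htb : t ∈ b
    · rw [if_pos htb, if_pos htb]
      exact pvInsert_existing_self (pvMapV d) p (pvSortI b) (by rw [pvMapV_keys]; exact hnd) hB
    · rw [if_neg htb, if_neg htb, pvMapV_insert]
  · have hcf : d.contains p = false := by simpa using hc
    have hset : d.setdefault p [] = d.insert p [] :=
      PySem.Dict.setdefault_of_not_contains d [] hcf
    have hgd : (d.insert p ([] : List Int)).getD p [] = ([] : List Int) :=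
      PySem.Dict.getD_insert_self d p [] []
    have hBn : (pvMapV d).get? p = none := by
      rw [pvMapV_get?, (PySem.Dict.get?_eq_none_iff_contains d p).2 hcf]; rfl
    simp only [pvUpdA, pvUpdB, hBn, hset, hgd, List.not_mem_nil, if_false, List.nil_append]
    rw [PySem.Dict.insert_insert_self]
    exact pvMapV_insert d p [t]

lemma pvUpdA_nodup (d : PySem.Dict (List Int) (List Int)) (p : List Int) (t : Int)
    (hnd : d.keys.Nodup) : (pvUpdA d p t).keys.Nodup := by
  by_cases hc : d.contains p = true
  · simp only [pvUpdA, PySem.Dict.setdefault_of_contains d [] hc]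
    split_ifs
    · exact hnd
    · exact PySem.Dict.nodup_keys_insert d p _ hnd
  · simp only [pvUpdA, PySem.Dict.setdefault_of_not_contains d [] (by simpa using hc)]
    split_ifs
    · exact PySem.Dict.nodup_keys_insert d p _ hnd
    · exact PySem.Dict.nodup_keys_insert _ p _ (PySem.Dict.nodup_keys_insert d p _ hnd)

-- ---- one sequence preserves the invariant ----
lemma pvGoA_nodup (seq : List Int) : ∀ (acc : List Int) (d : PySem.Dict (List Int) (List Int)),
    d.keys.Nodup → (pvGoA d acc seq).keys.Nodup := by
  induction seq with
  | nil => intro acc d hnd; exact hnd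
  | cons t r ih => intro acc d hnd; exact ih (acc ++ [t]) _ (pvUpdA_nodup d acc t hnd)

lemma pvGo_step (seq : List Int) : ∀ (acc : List Int) (d : PySem.Dict (List Int) (List Int)),
    d.keys.Nodup → pvGoB (pvMapV d) acc seq = pvMapV (pvGoA d acc seq) := by
  induction seq with
  | nil => intro acc d _; rfl
  | cons t r ih =>
    intro acc d hnd
    show pvGoB (pvUpdB (pvMapV d) acc t) (acc ++ [t]) r = pvMapV (pvGoA (pvUpdA d acc t) (acc ++ [t]) r)
    rw [pvUpd_step d acc t hnd]
    exact ih (acc ++ [t]) _ (pvUpdA_nodup d acc t hnd)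

-- ---- A's inner index loop is the structural walk ----
lemma pvA_inner (full : List Int) : ∀ (seq acc : List Int) (d : PySem.Dict (List Int) (List Int)),
    acc ++ seq = full →
    (PySem.List.pyRange (acc.length : Int) (full.length : Int) 1).foldl
      (fun d pos => pvUpdA d (PySem.List.slice full none (some pos)) (PySem.List.pyGetD full pos 0)) d
    = pvGoA d acc seq := by
  intro seq
  induction seq with
  | nil =>
    intro acc d h
    simp only [List.append_nil] at h
    subst h
    rw [PySem.List.pyRange_one_eq_nil (le_refl _)]
    rfl
  | cons t r ih =>
    intro acc d h
    have hlt : (acc.length : Int) < (full.length : Int) := by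
      rw [← h]
      simp only [List.length_append, List.length_cons]
      push_cast
      omega
    rw [PySem.List.pyRange_one_cons hlt, List.foldl_cons]
    have hs : PySem.List.slice full none (some (acc.length : Int)) = acc := by
      rw [PySem.List.slice_to_natCast, ← h]
      exact List.take_left
    have hg : PySem.List.pyGetD full (acc.length : Int) 0 = t := by
      rw [PySem.List.pyGetD_natCast, ← h]
      rw [List.getD_eq_getElem?_getD, List.getElem?_append_right (le_refl _)]
      simp
    rw [hs, hg]
    have hcast : (acc.length : Int) + 1 = ((acc ++ [t]).length : Int) := by
      simp
    rw [hcast, show pvGoA d acc (t :: r) = pvGoA (pvUpdA d acc t) (acc ++ [t]) r from rfl]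
    exact ih (acc ++ [t]) (pvUpdA d acc t) (by simpa using h)

-- ---- B's inner fold is the structural walk ----
lemma pvB_inner (seq : List Int) : ∀ (acc : List Int) (d : PySem.Dict (List Int) (List Int)),
    (seq.foldl (fun (s : PySem.Dict (List Int) (List Int) × List Int) tok =>
        match s.1.get? s.2 with
        | none => (s.1.insert s.2 [tok], s.2 ++ [tok])
        | some bucket =>
          let lo := pvBisect bucket tok 0 bucket.length
          let bucket' := if lo = bucket.length ∨ PySem.List.pyGetD bucket (lo : Int) 0 ≠ tok
            then PySem.List.insert bucket (lo : Int) tok else bucket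
          (s.1.insert s.2 bucket', s.2 ++ [tok]))
      (d, acc)).1 = pvGoB d acc seq := by
  induction seq with
  | nil => intro acc d; rfl
  | cons t r ih =>
    intro acc d
    rw [List.foldl_cons]
    cases h : d.get? acc with
    | none => simpa [pvGoB, pvUpdB, h] using ih (acc ++ [t]) (d.insert acc [t])
    | some b => simpa [pvGoB, pvUpdB, pvBIns, h] using ih (acc ++ [t]) (d.insert acc (pvBIns b t))

-- ---- A's final sorting pass is pvMapV ----
lemma pvNorm_items (ks : List (List Int)) : ∀ (d : PySem.Dict (List Int) (List Int)),
    ks.Nodup → d.keys.Nodup → (∀ p ∈ ks, d.contains p = true) →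
    (ks.foldl (fun tr p => tr.insert p (PySem.List.sorted (tr.getD p []) (fun x => x) false)) d).items
      = d.items.map (fun q => if q.1 ∈ ks then (q.1, pvSortI q.2) else q) := by
  induction ks with
  | nil => intro d _ _ _; simp
  | cons p rest ih =>
    intro d hks hnd hmem
    rcases List.nodup_cons.1 hks with ⟨hp, hrest⟩
    have hcp : d.contains p = true := hmem p List.mem_cons_self
    rw [List.foldl_cons]
    have hitems' : (d.insert p (PySem.List.sorted (d.getD p []) (fun x => x) false)).items
        = d.items.map (fun q => if (q.1 == p) = true then (p, pvSortI (d.getD p [])) else q) :=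
      PySem.Dict.items_insert_of_contains d _ hcp
    have hkeys' : (d.insert p (PySem.List.sorted (d.getD p []) (fun x => x) false)).keys = d.keys :=
      PySem.Dict.keys_insert_of_contains d _ hcp
    have hnd' : (d.insert p (PySem.List.sorted (d.getD p []) (fun x => x) false)).keys.Nodup :=
      hkeys' ▸ hnd
    have hmem' : ∀ q ∈ rest,
        (d.insert p (PySem.List.sorted (d.getD p []) (fun x => x) false)).contains q = true := by
      intro q hq
      rw [PySem.Dict.contains_iff_mem_keys, hkeys', ← PySem.Dict.contains_iff_mem_keys]
      exact hmem q (List.mem_cons_of_mem _ hq)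
    rw [ih _ hrest hnd' hmem', hitems', List.map_map]
    refine List.map_congr_left ?_
    intro q hq
    obtain ⟨q1, q2⟩ := q
    by_cases hqp : q1 = p
    · have hq2 : d.getD p [] = q2 := by
        rw [← hqp]
        exact PySem.Dict.getD_of_mem_items d hq hnd []
      simp [Function.comp, hqp, hq2, hp]
    · have hbeq : (q1 == p) = false := by simpa using hqp
      simp only [Function.comp_apply, hbeq, Bool.false_eq_true, if_false]
      by_cases hqr : q1 ∈ rest
      · simp [hqr, hqp]
      · simp [hqr, hqp]

-- ---- the outer loops ----
lemma pvOuterA_nodup (m : List (List Int × Int)) : ∀ (d : PySem.Dict (List Int) (List Int)),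
    d.keys.Nodup → (m.foldl (fun d kv => pvGoA d [] kv.1) d).keys.Nodup := by
  induction m with
  | nil => intro d hnd; exact hnd
  | cons kv rest ih => intro d hnd; exact ih _ (pvGoA_nodup kv.1 [] d hnd)

lemma pvOuter_step (m : List (List Int × Int)) : ∀ (d : PySem.Dict (List Int) (List Int)),
    d.keys.Nodup →
    m.foldl (fun d kv => pvGoB d [] kv.1) (pvMapV d) = pvMapV (m.foldl (fun d kv => pvGoA d [] kv.1) d) := by
  induction m with
  | nil => intro d _; rfl
  | cons kv rest ih =>
    intro d hnd
    rw [List.foldl_cons, List.foldl_cons, pvGo_step kv.1 [] d hnd]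
    exact ih _ (pvGoA_nodup kv.1 [] d hnd)

-- ===== VERDICT (by name: the statement is the Claim_ definition above) =====
theorem build_sid_prefix_to_next_spec : Claim_equal_build_sid_prefix_to_next := by
  intro m _
  unfold Spec_build_sid_prefix_to_next build_sid_prefix_to_next build_sid_prefix_to_next_alt
  -- rewrite both outer folds into the structural walks
  have hA : (fun (trie : PySem.Dict (List Int) (List Int)) (kv : List Int × Int) =>
      (PySem.List.pyRange 0 ((kv.1.length : Int)) 1).foldl (fun trie pos =>
        let prefx := PySem.List.slice kv.1 none (some pos)
        let nxt := PySem.List.pyGetD kv.1 pos 0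
        let trie := trie.setdefault prefx []
        let bucket := trie.getD prefx []
        if nxt ∈ bucket then trie else trie.insert prefx (bucket ++ [nxt])) trie)
      = (fun d kv => pvGoA d [] kv.1) := by
    funext d kv
    exact pvA_inner kv.1 kv.1 [] d rfl
  have hB : (fun (out : PySem.Dict (List Int) (List Int)) (kv : List Int × Int) =>
      (kv.1.foldl (fun (s : PySem.Dict (List Int) (List Int) × List Int) tok =>
          match s.1.get? s.2 with
          | none => (s.1.insert s.2 [tok], s.2 ++ [tok])
          | some bucket =>
            let lo := pvBisect bucket tok 0 bucket.length
            let bucket' := if lo = bucket.length ∨ PySem.List.pyGetD bucket (lo : Int) 0 ≠ tok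
              then PySem.List.insert bucket (lo : Int) tok else bucket
            (s.1.insert s.2 bucket', s.2 ++ [tok]))
        (out, ([] : List Int))).1)
      = (fun d kv => pvGoB d [] kv.1) := by
    funext d kv
    exact pvB_inner kv.1 [] d
  rw [hA, hB]
  have hnd0 : (PySem.Dict.empty : PySem.Dict (List Int) (List Int)).keys.Nodup :=
    PySem.Dict.nodup_keys_empty
  have hE : (PySem.Dict.empty : PySem.Dict (List Int) (List Int)) = pvMapV PySem.Dict.empty := rfl
  set dA := m.foldl (fun d kv => pvGoA d [] kv.1) PySem.Dict.empty with hdA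
  have hndA : dA.keys.Nodup := pvOuterA_nodup m _ hnd0
  have hout : m.foldl (fun d kv => pvGoB d [] kv.1) PySem.Dict.empty = pvMapV dA := by
    rw [hE, pvOuter_step m PySem.Dict.empty hnd0]
  rw [hout]
  rw [pvNorm_items dA.keys dA hndA hndA (fun p hp => (PySem.Dict.contains_iff_mem_keys dA p).2 hp)]
  rw [pvMapV_items]
  refine (List.map_congr_left ?_).symm
  intro q hq
  have : q.1 ∈ dA.keys := by
    simp only [PySem.Dict.keys]
    exact List.mem_map_of_mem hq
  rw [if_pos this]
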